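-- pv_equiv track=rewrite | github.com/ShantaRam81/AnimeGenerator | src/generator.py | _split_prompt
-- ===== SOURCE A (Python) =====
-- def _split_prompt(prompt: str) -> str:
--     """Разделяет длинный промпт на части и комбинирует их"""
--     # Разделяем промпт по запятым
--     parts = [p.strip() for p in prompt.split(',')]
--
--     # Группируем части в chunks, чтобы не превышать лимит токенов
--     chunks = []
--     current_chunk = []
--     current_length = 0
--
--     for part in parts:
--         # Примерная оценка количества токенов (может потребоваться корректировка)
--         part_tokens = len(part.split())
--         if current_length + part_tokens > 70:  # Оставляем небольшой запас
--             chunks.append(', '.join(current_chunk))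
--             current_chunk = [part]
--             current_length = part_tokens
--         else:
--             current_chunk.append(part)
--             current_length += part_tokens
--
--     if current_chunk:
--         chunks.append(', '.join(current_chunk))
--
--     # Возвращаем первый чанк (наиболее важные части промпта)
--     return chunks[0]
-- ===== SOURCE B (Python) =====
-- def _split_prompt(prompt: str) -> str:
--     """Разделяет длинный промпт на части и комбинирует их"""
--     parts = [p.strip() for p in prompt.split(',')]
--     counts = [len(p.split()) for p in parts]
--     # locate the boundary of the first chunk: the first index where the
--     # running token total exceeds 70 (k = len(parts) if it never does)
--     k = len(parts)
--     total = 0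
--     for i, c in enumerate(counts):
--         total += c
--         if total > 70:
--             k = i
--             break
--     return ', '.join(parts[:k])
-- ===== Notes on version B (the rewrite author's own statement) =====
-- stated objective: simpler
-- what changed: Replaces A's stateful fold that builds every chunk (chunks/current_chunk/current_length with a final flush and returning the first chunk) by computing per-part token counts, locating the first prefix-sum boundary k, and joining the first k parts with comma-space.
import Mathlib
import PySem

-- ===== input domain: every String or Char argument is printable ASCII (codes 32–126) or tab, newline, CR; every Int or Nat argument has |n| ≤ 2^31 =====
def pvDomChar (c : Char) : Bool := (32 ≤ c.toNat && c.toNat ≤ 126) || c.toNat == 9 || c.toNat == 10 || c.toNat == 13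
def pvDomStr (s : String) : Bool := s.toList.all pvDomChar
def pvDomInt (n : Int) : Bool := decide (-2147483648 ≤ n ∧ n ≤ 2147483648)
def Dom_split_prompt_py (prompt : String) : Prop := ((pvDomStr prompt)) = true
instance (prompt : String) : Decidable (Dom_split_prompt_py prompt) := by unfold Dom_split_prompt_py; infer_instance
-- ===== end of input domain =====

-- B replaces A's stateful chunk-building fold by counts → first prefix-sum boundary k → join of parts[:k]; objective: simpler.


-- ===== PORT A =====
-- one loop step of A: state = (chunks, current_chunk, current_length)
def pvStepA (st : List String × List String × Nat) (part : String) : List String × List String × Nat :=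
  let t := (PySem.Str.split₀ part).length
  if st.2.2 + t > 70 then (st.1 ++ [PySem.Str.join ", " st.2.1], [part], t)
  else (st.1, st.2.1 ++ [part], st.2.2 + t)

def split_prompt_py (prompt : String) : String :=
  let parts := ((PySem.Str.split? prompt ",").getD []).map PySem.Str.strip
  let st := parts.foldl pvStepA ([], [], 0)
  let chunks := if st.2.1 ≠ [] then st.1 ++ [PySem.Str.join ", " st.2.1] else st.1
  -- chunks[0]: always present, since split(',') returns at least one part
  (PySem.List.pyGet? chunks 0).getD ""

-- ===== PORT B =====
-- first index at which the running token total exceeds 70 (length if never)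
def pvFindK (counts : List Nat) (total : Nat) : Nat :=
  match counts with
  | [] => 0
  | c :: rest => if total + c > 70 then 0 else pvFindK rest (total + c) + 1

def split_prompt_py_alt (prompt : String) : String :=
  let parts := ((PySem.Str.split? prompt ",").getD []).map PySem.Str.strip
  let counts := parts.map (fun p => (PySem.Str.split₀ p).length)
  PySem.Str.join ", " (parts.take (pvFindK counts 0))

-- ===== PRECONDITION & SPEC =====
def Spec_split_prompt_py (prompt : String) (out : String) : Prop := out = split_prompt_py_alt prompt
instance (prompt : String) (out : String) : Decidable (Spec_split_prompt_py prompt out) := by unfold Spec_split_prompt_py; infer_instance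

-- ===== CLAIM (what is proved, stated in full; the proofs are below) =====
def Claim_equal_split_prompt_py : Prop := ∀ (prompt : String), Dom_split_prompt_py prompt → Spec_split_prompt_py prompt (split_prompt_py prompt)

-- ===== LEMMAS AND PROOFS =====

-- once A's chunks list is nonempty, its first element never changes
theorem pvHeadA (parts : List String) (c : String) (cs cur : List String) (len : Nat) :
    ((parts.foldl pvStepA (c :: cs, cur, len)).1).head? = some c := by
  induction parts generalizing cs cur len with
  | nil => rfl
  | cons p ps ih =>
      simp only [List.foldl_cons, pvStepA]
      split_ifs with h
      · simpa using ih (cs ++ [PySem.Str.join ", " cur]) [p] _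
      · exact ih cs (cur ++ [p]) _

theorem pvGet0 (l : List String) : (PySem.List.pyGet? l 0).getD "" = l.head?.getD "" := by
  cases l <;> simp [PySem.List.pyGet?, PySem.List.pyIdx?]

-- the first chunk A produces from state ([], cur, len) is cur followed by the
-- parts up to the first prefix-sum boundary, joined
theorem pvMainA (parts cur : List String) (len : Nat) :
    (PySem.List.pyGet?
        (if ((parts.foldl pvStepA ([], cur, len)).2.1) ≠ [] then
            (parts.foldl pvStepA ([], cur, len)).1 ++
              [PySem.Str.join ", " (parts.foldl pvStepA ([], cur, len)).2.1]
          else (parts.foldl pvStepA ([], cur, len)).1) 0).getD ""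
      = PySem.Str.join ", "
          (cur ++ parts.take (pvFindK (parts.map fun p => (PySem.Str.split₀ p).length) len)) := by
  induction parts generalizing cur len with
  | nil =>
      simp only [List.foldl_nil, List.map_nil, pvFindK, List.take_nil, List.append_nil]
      split_ifs with h
      · simp
      · simp only [ne_eq, not_not] at h
        subst h
        simp [pvGet0, PySem.Str.join]
  | cons p ps ih =>
      simp only [List.foldl_cons, pvStepA, List.map_cons, pvFindK]
      by_cases h : len + (PySem.Str.split₀ p).length > 70
      · -- overflow: the first chunk is sealed as join cur; head stays fixed afterwards
        simp only [if_pos h]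
        have hh := pvHeadA ps (PySem.Str.join ", " cur) [] [p]
          ((PySem.Str.split₀ p).length)
        simp only [List.take_zero, List.append_nil]
        split_ifs with h2
        · rw [pvGet0]
          cases hfold : (ps.foldl pvStepA ([PySem.Str.join ", " cur], [p],
              (PySem.Str.split₀ p).length)).1 with
          | nil => rw [hfold] at hh; simp at hh
          | cons a t =>
              rw [hfold] at hh; simp at hh
              simp [hfold, hh]
        · rw [pvGet0]
          cases hfold : (ps.foldl pvStepA ([PySem.Str.join ", " cur], [p],
              (PySem.Str.split₀ p).length)).1 with
          | nil => rw [hfold] at hh; simp at hh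
          | cons a t =>
              rw [hfold] at hh; simp at hh
              simp [hfold, hh]
      · simp only [if_neg h]
        rw [ih (cur ++ [p]) (len + (PySem.Str.split₀ p).length)]
        simp

-- ===== VERDICT (by name: the statement is the Claim_ definition above) =====
theorem split_prompt_py_spec : Claim_equal_split_prompt_py := by
  intro prompt _
  unfold Spec_split_prompt_py split_prompt_py split_prompt_py_alt
  simpa using pvMainA (((PySem.Str.split? prompt ",").getD []).map PySem.Str.strip) [] 0
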